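-- pv_equiv track=rewrite | github.com/seanangio/nps-hikes | api/nlq/parser.py | _normalize_visit_month
-- ===== SOURCE A (Python) =====
-- _MONTH_NAME_TO_DB_VALUES: dict[str, list[str]] = {
--     "january": ["Jan", "January"],
--     "february": ["Feb", "February"],
--     "march": ["Mar", "March"],
--     "april": ["Apr", "April"],
--     "may": ["May"],
--     "june": ["Jun", "June"],
--     "july": ["Jul", "July"],
--     "august": ["Aug", "August"],
--     "september": ["Sep", "September"],
--     "october": ["Oct", "October"],
--     "november": ["Nov", "November"],
--     "december": ["Dec", "December"],
-- }
--
-- _MONTH_ABBR_TO_FULL: dict[str, str] = {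
--     "jan": "january",
--     "feb": "february",
--     "mar": "march",
--     "apr": "april",
--     "may": "may",
--     "jun": "june",
--     "jul": "july",
--     "aug": "august",
--     "sep": "september",
--     "oct": "october",
--     "nov": "november",
--     "dec": "december",
-- }
--
-- _MONTH_NUM_TO_FULL: dict[str, str] = {
--     "1": "january",
--     "2": "february",
--     "3": "march",
--     "4": "april",
--     "5": "may",
--     "6": "june",
--     "7": "july",
--     "8": "august",
--     "9": "september",
--     "10": "october",
--     "11": "november",
--     "12": "december",
-- }
--
-- _SEASON_TO_MONTHS: dict[str, list[str]] = {
--     "spring": ["march", "april", "may"],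
--     "summer": ["june", "july", "august"],
--     "fall": ["september", "october", "november"],
--     "autumn": ["september", "october", "november"],
--     "winter": ["december", "january", "february"],
-- }
--
-- def _normalize_visit_month(raw: str) -> list[str] | None:
--     """Normalize a visit_month string to a list of DB-compatible values.
--
--     Handles full names, 3-letter abbreviations, numeric strings, and seasons.
--     Returns None if the input cannot be recognized.
--     """
--     key = raw.strip().lower()
--
--     # Check season first (expands to multiple months)
--     if key in _SEASON_TO_MONTHS:
--         result: list[str] = []
--         for month_key in _SEASON_TO_MONTHS[key]:
--             result.extend(_MONTH_NAME_TO_DB_VALUES[month_key])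
--         return result
--
--     # Check full month name
--     if key in _MONTH_NAME_TO_DB_VALUES:
--         return list(_MONTH_NAME_TO_DB_VALUES[key])
--
--     # Check 3-letter abbreviation
--     if key in _MONTH_ABBR_TO_FULL:
--         full = _MONTH_ABBR_TO_FULL[key]
--         return list(_MONTH_NAME_TO_DB_VALUES[full])
--
--     # Check numeric string
--     if key in _MONTH_NUM_TO_FULL:
--         full = _MONTH_NUM_TO_FULL[key]
--         return list(_MONTH_NAME_TO_DB_VALUES[full])
--
--     return None
-- ===== SOURCE B (Python) =====
-- # B: instead of four cascading lookup tables, keep only the 12 DB value lists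
-- # indexed by month number plus a season->month-numbers map; recognition derives
-- # the lowercase full name, 3-letter abbreviation and numeric string from the
-- # value list itself, and the result is expanded from month numbers.
--
-- _DB = [["Jan", "January"], ["Feb", "February"], ["Mar", "March"],
--        ["Apr", "April"], ["May"], ["Jun", "June"], ["Jul", "July"],
--        ["Aug", "August"], ["Sep", "September"], ["Oct", "October"],
--        ["Nov", "November"], ["Dec", "December"]]
--
-- _SEASON_NUMS = {
--     "spring": [3, 4, 5],
--     "summer": [6, 7, 8],
--     "fall": [9, 10, 11],
--     "autumn": [9, 10, 11],
--     "winter": [12, 1, 2],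
-- }
--
--
-- def _normalize_visit_month(raw: str) -> list[str] | None:
--     """Normalize a visit_month string to a list of DB-compatible values."""
--     key = raw.strip().lower()
--     nums = _SEASON_NUMS.get(key)
--     if nums is None:
--         nums = [i + 1
--                 for i, vals in enumerate(_DB)
--                 if key == vals[-1].lower()          # full month name
--                 or key == vals[0][:3].lower()       # 3-letter abbreviation
--                 or key == str(i + 1)]               # numeric string
--         if not nums:
--             return None
--     return [v for n in nums for v in _DB[n - 1]]
-- ===== Notes on version B (the rewrite author's own statement) =====
-- stated objective: alternative
-- what changed: Replaces A's four cascading lookup tables by a single list of 12 DB value lists indexed by month number plus a season-to-month-numbers map: recognition scans the 12 entries deriving the lowercase full name, 3-letter abbreviation and numeric string from the value list itself, and the result is expanded from month numbers.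
import Mathlib
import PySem

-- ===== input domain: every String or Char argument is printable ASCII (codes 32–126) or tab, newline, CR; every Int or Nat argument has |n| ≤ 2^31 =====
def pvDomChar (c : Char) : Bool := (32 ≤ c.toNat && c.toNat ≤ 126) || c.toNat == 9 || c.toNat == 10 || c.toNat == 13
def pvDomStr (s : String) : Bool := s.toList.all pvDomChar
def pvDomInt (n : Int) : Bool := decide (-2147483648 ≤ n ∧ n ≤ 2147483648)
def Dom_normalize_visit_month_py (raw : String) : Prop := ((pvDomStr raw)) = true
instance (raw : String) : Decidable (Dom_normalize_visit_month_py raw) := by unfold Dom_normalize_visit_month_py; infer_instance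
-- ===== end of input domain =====

-- B replaces A's four cascading lookup tables by one list of 12 DB value lists indexed by
-- month number plus a season->month-numbers map (objective: alternative).

-- ===== PORT A =====
-- module-scope dicts of Source A
def pvNameToDb : PySem.Dict String (List String) := PySem.Dict.ofList
  [("january", ["Jan", "January"]), ("february", ["Feb", "February"]),
   ("march", ["Mar", "March"]), ("april", ["Apr", "April"]), ("may", ["May"]),
   ("june", ["Jun", "June"]), ("july", ["Jul", "July"]), ("august", ["Aug", "August"]),
   ("september", ["Sep", "September"]), ("october", ["Oct", "October"]),
   ("november", ["Nov", "November"]), ("december", ["Dec", "December"])]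

def pvAbbrToFull : PySem.Dict String String := PySem.Dict.ofList
  [("jan", "january"), ("feb", "february"), ("mar", "march"), ("apr", "april"),
   ("may", "may"), ("jun", "june"), ("jul", "july"), ("aug", "august"),
   ("sep", "september"), ("oct", "october"), ("nov", "november"), ("dec", "december")]

def pvNumToFull : PySem.Dict String String := PySem.Dict.ofList
  [("1", "january"), ("2", "february"), ("3", "march"), ("4", "april"),
   ("5", "may"), ("6", "june"), ("7", "july"), ("8", "august"),
   ("9", "september"), ("10", "october"), ("11", "november"), ("12", "december")]

def pvSeasonToMonths : PySem.Dict String (List String) := PySem.Dict.ofList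
  [("spring", ["march", "april", "may"]), ("summer", ["june", "july", "august"]),
   ("fall", ["september", "october", "november"]),
   ("autumn", ["september", "october", "november"]),
   ("winter", ["december", "january", "february"])]

-- A's cascade as a function of the computed key; d[k] is written 'getD d k []':
-- in Source A the key is always present at that point (Python's KeyError is unreachable).
def pvLookupA (key : String) : Option (List String) :=
  match pvSeasonToMonths.get? key with
  | some months =>
      -- result = []; for month_key in months: result.extend(_MONTH_NAME_TO_DB_VALUES[month_key])
      some (months.foldl (fun result month_key => result ++ pvNameToDb.getD month_key []) [])
  | none =>
    match pvNameToDb.get? key with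
    | some v => some v          -- list(...) copies; a Lean list needs no copy
    | none =>
      match pvAbbrToFull.get? key with
      | some full => some (pvNameToDb.getD full [])
      | none =>
        match pvNumToFull.get? key with
        | some full => some (pvNameToDb.getD full [])
        | none => none

def normalize_visit_month_py (raw : String) : Option (List String) :=
  pvLookupA (PySem.Str.lower (PySem.Str.strip raw))

-- ===== PORT B =====
-- _DB of Source B: the 12 DB value lists, indexed by month number - 1
def pvDB : List (List String) :=
  [["Jan", "January"], ["Feb", "February"], ["Mar", "March"],
   ["Apr", "April"], ["May"], ["Jun", "June"], ["Jul", "July"],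
   ["Aug", "August"], ["Sep", "September"], ["Oct", "October"],
   ["Nov", "November"], ["Dec", "December"]]

-- _SEASON_NUMS of Source B
def pvSeasonNums : PySem.Dict String (List Int) := PySem.Dict.ofList
  [("spring", [3, 4, 5]), ("summer", [6, 7, 8]), ("fall", [9, 10, 11]),
   ("autumn", [9, 10, 11]), ("winter", [12, 1, 2])]

-- the recognition comprehension of Source B; vals[-1] / vals[0] use getD "" since
-- every entry of _DB is nonempty (IndexError unreachable)
def pvMatchNums (key : String) : List Int :=
  (PySem.List.enumerate pvDB).filterMap (fun p =>
    if key = PySem.Str.lower ((PySem.List.pyGet? p.2 (-1)).getD "")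
       ∨ key = PySem.Str.lower (PySem.Str.slice ((PySem.List.pyGet? p.2 0).getD "") none (some 3))
       ∨ key = PySem.Int.toStr (p.1 + 1)
    then some (p.1 + 1) else none)

-- [v for n in nums for v in _DB[n - 1]]; _DB[n-1] via pyGet?/getD (n is 1..12 here)
def pvExpand (nums : List Int) : List String :=
  nums.flatMap (fun n => (PySem.List.pyGet? pvDB (n - 1)).getD [])

def normalize_visit_month_py_alt (raw : String) : Option (List String) :=
  let key := PySem.Str.lower (PySem.Str.strip raw)
  match pvSeasonNums.get? key with
  | some nums => some (pvExpand nums)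
  | none =>
    match pvMatchNums key with
    | [] => none
    | nums => some (pvExpand nums)

-- ===== PRECONDITION & SPEC =====
def Spec_normalize_visit_month_py (raw : String) (out : Option (List String)) : Prop := out = normalize_visit_month_py_alt raw
instance (raw : String) (out : Option (List String)) : Decidable (Spec_normalize_visit_month_py raw out) := by unfold Spec_normalize_visit_month_py; infer_instance

-- ===== CLAIM (what is proved, stated in full; the proofs are below) =====
def Claim_equal_normalize_visit_month_py : Prop := ∀ (raw : String), Dom_normalize_visit_month_py raw → Spec_normalize_visit_month_py raw (normalize_visit_month_py raw)

-- ===== LEMMAS AND PROOFS =====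
-- B as a function of the computed key (definitional reshaping of the alt port)
def pvLookupB (key : String) : Option (List String) :=
  match pvSeasonNums.get? key with
  | some nums => some (pvExpand nums)
  | none =>
    match pvMatchNums key with
    | [] => none
    | nums => some (pvExpand nums)

theorem pv_alt_eq (raw : String) :
    normalize_visit_month_py_alt raw = pvLookupB (PySem.Str.lower (PySem.Str.strip raw)) := rfl

-- Case split on the computed key: each of the 40 recognized keys by evaluation,
-- and one final case where every lookup misses.
set_option maxRecDepth 65536 in
set_option maxHeartbeats 4000000 in
theorem pv_core (key : String) : pvLookupA key = pvLookupB key := by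
  by_cases h0 : key = "spring"
  · subst h0; decide
  by_cases h1 : key = "summer"
  · subst h1; decide
  by_cases h2 : key = "fall"
  · subst h2; decide
  by_cases h3 : key = "autumn"
  · subst h3; decide
  by_cases h4 : key = "winter"
  · subst h4; decide
  by_cases h5 : key = "january"
  · subst h5; decide
  by_cases h6 : key = "february"
  · subst h6; decide
  by_cases h7 : key = "march"
  · subst h7; decide
  by_cases h8 : key = "april"
  · subst h8; decide
  by_cases h9 : key = "may"
  · subst h9; decide
  by_cases h10 : key = "june"
  · subst h10; decide
  by_cases h11 : key = "july"
  · subst h11; decide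
  by_cases h12 : key = "august"
  · subst h12; decide
  by_cases h13 : key = "september"
  · subst h13; decide
  by_cases h14 : key = "october"
  · subst h14; decide
  by_cases h15 : key = "november"
  · subst h15; decide
  by_cases h16 : key = "december"
  · subst h16; decide
  by_cases h17 : key = "jan"
  · subst h17; decide
  by_cases h18 : key = "feb"
  · subst h18; decide
  by_cases h19 : key = "mar"
  · subst h19; decide
  by_cases h20 : key = "apr"
  · subst h20; decide
  by_cases h21 : key = "jun"
  · subst h21; decide
  by_cases h22 : key = "jul"
  · subst h22; decide
  by_cases h23 : key = "aug"
  · subst h23; decide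
  by_cases h24 : key = "sep"
  · subst h24; decide
  by_cases h25 : key = "oct"
  · subst h25; decide
  by_cases h26 : key = "nov"
  · subst h26; decide
  by_cases h27 : key = "dec"
  · subst h27; decide
  by_cases h28 : key = "1"
  · subst h28; decide
  by_cases h29 : key = "2"
  · subst h29; decide
  by_cases h30 : key = "3"
  · subst h30; decide
  by_cases h31 : key = "4"
  · subst h31; decide
  by_cases h32 : key = "5"
  · subst h32; decide
  by_cases h33 : key = "6"
  · subst h33; decide
  by_cases h34 : key = "7"
  · subst h34; decide
  by_cases h35 : key = "8"
  · subst h35; decide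
  by_cases h36 : key = "9"
  · subst h36; decide
  by_cases h37 : key = "10"
  · subst h37; decide
  by_cases h38 : key = "11"
  · subst h38; decide
  by_cases h39 : key = "12"
  · subst h39; decide
  have hseason : pvSeasonToMonths.get? key = none := by
    rw [PySem.Dict.get?_eq_none_iff_not_mem_keys]
    rw [show pvSeasonToMonths.keys = ["spring", "summer", "fall", "autumn", "winter"] from by decide]
    simp only [List.mem_cons, List.not_mem_nil]
    tauto
  have hname : pvNameToDb.get? key = none := by
    rw [PySem.Dict.get?_eq_none_iff_not_mem_keys]
    rw [show pvNameToDb.keys = ["january", "february", "march", "april", "may", "june", "july", "august", "september", "october", "november", "december"] from by decide]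
    simp only [List.mem_cons, List.not_mem_nil]
    tauto
  have habbr : pvAbbrToFull.get? key = none := by
    rw [PySem.Dict.get?_eq_none_iff_not_mem_keys]
    rw [show pvAbbrToFull.keys = ["jan", "feb", "mar", "apr", "may", "jun", "jul", "aug", "sep", "oct", "nov", "dec"] from by decide]
    simp only [List.mem_cons, List.not_mem_nil]
    tauto
  have hnum : pvNumToFull.get? key = none := by
    rw [PySem.Dict.get?_eq_none_iff_not_mem_keys]
    rw [show pvNumToFull.keys = ["1", "2", "3", "4", "5", "6", "7", "8", "9", "10", "11", "12"] from by decide]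
    simp only [List.mem_cons, List.not_mem_nil]
    tauto
  have hseasonB : pvSeasonNums.get? key = none := by
    rw [PySem.Dict.get?_eq_none_iff_not_mem_keys]
    rw [show pvSeasonNums.keys = ["spring", "summer", "fall", "autumn", "winter"] from by decide]
    simp only [List.mem_cons, List.not_mem_nil]
    tauto
  have hmatch : pvMatchNums key = [] := by
    unfold pvMatchNums
    rw [List.filterMap_eq_nil_iff]
    intro p hp
    fin_cases hp <;>
      · rw [if_neg]
        rintro (h | h | h) <;>
          first
            | exact h0 (h.trans (by decide)) | exact h1 (h.trans (by decide))
            | exact h2 (h.trans (by decide)) | exact h3 (h.trans (by decide))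
            | exact h4 (h.trans (by decide)) | exact h5 (h.trans (by decide))
            | exact h6 (h.trans (by decide)) | exact h7 (h.trans (by decide))
            | exact h8 (h.trans (by decide)) | exact h9 (h.trans (by decide))
            | exact h10 (h.trans (by decide)) | exact h11 (h.trans (by decide))
            | exact h12 (h.trans (by decide)) | exact h13 (h.trans (by decide))
            | exact h14 (h.trans (by decide)) | exact h15 (h.trans (by decide))
            | exact h16 (h.trans (by decide)) | exact h17 (h.trans (by decide))
            | exact h18 (h.trans (by decide)) | exact h19 (h.trans (by decide))
            | exact h20 (h.trans (by decide)) | exact h21 (h.trans (by decide))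
            | exact h22 (h.trans (by decide)) | exact h23 (h.trans (by decide))
            | exact h24 (h.trans (by decide)) | exact h25 (h.trans (by decide))
            | exact h26 (h.trans (by decide)) | exact h27 (h.trans (by decide))
            | exact h28 (h.trans (by decide)) | exact h29 (h.trans (by decide))
            | exact h30 (h.trans (by decide)) | exact h31 (h.trans (by decide))
            | exact h32 (h.trans (by decide)) | exact h33 (h.trans (by decide))
            | exact h34 (h.trans (by decide)) | exact h35 (h.trans (by decide))
            | exact h36 (h.trans (by decide)) | exact h37 (h.trans (by decide))
            | exact h38 (h.trans (by decide)) | exact h39 (h.trans (by decide))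
  unfold pvLookupA pvLookupB
  rw [hseason, hname, habbr, hnum, hseasonB, hmatch]

-- ===== VERDICT (by name: the statement is the Claim_ definition above) =====
theorem normalize_visit_month_py_spec : Claim_equal_normalize_visit_month_py := by
  intro raw _
  unfold Spec_normalize_visit_month_py normalize_visit_month_py
  rw [pv_alt_eq]
  exact pv_core _
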